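-- pv_equiv track=rewrite | github.com/Uzbec/middle | ft_oct_num.py | ft_oct_num
-- ===== SOURCE A (Python) =====
-- def ft_oct_num(a):
--     k = 0
--     m = 1
--     while a > 0:
--         k += a % 8 * m
--         m *= 10
--         a //= 8
--     return k
-- ===== SOURCE B (Python) =====
-- def ft_oct_num(a):
--     return int(oct(a)[2:]) if a > 0 else 0
-- ===== Notes on version B (the rewrite author's own statement) =====
-- stated objective: idiomatic
-- what changed: Replaces the manual digit-extraction loop with decimal place values by formatting the number with the builtin oct(), stripping the '0o' prefix and reparsing the digit string with int().
import Mathlib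
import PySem

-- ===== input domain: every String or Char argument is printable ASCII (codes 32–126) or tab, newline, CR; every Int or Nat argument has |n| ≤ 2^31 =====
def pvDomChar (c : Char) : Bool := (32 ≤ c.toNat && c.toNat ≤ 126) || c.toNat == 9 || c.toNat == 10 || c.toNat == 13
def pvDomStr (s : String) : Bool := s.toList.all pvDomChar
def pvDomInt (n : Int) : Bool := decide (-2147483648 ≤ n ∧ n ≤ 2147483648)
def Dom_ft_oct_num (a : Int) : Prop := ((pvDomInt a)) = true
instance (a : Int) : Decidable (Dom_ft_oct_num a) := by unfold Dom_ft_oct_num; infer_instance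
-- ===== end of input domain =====

-- B replaces A's manual octal-digit loop by oct()-format-then-reparse (idiomatic, same cost).

-- ===== PORT A =====
-- termination helper for the while loop (a //= 8 strictly shrinks a positive a)
theorem ftOctShrink (a : Int) (h : 0 < a) :
    (PySem.Int.floordiv a 8).toNat < a.toNat := by
  rw [PySem.Int.floordiv_eq_ediv_of_pos (by norm_num)]
  omega

-- the while loop of A, state (a, k, m)
def ftOctLoop (a k m : Int) : Int :=
  if h : 0 < a then
    ftOctLoop (PySem.Int.floordiv a 8) (k + PySem.Int.mod a 8 * m) (m * 10)
  else k
termination_by a.toNat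
decreasing_by exact ftOctShrink a h

def ft_oct_num (a : Int) : Int := ftOctLoop a 0 1

-- ===== PORT B =====
-- oct(a)[2:] for a > 0: the octal digit characters of a, most significant first
def ftOctChars (a : Int) : List Char :=
  if h : 0 < a then
    ftOctChars (PySem.Int.floordiv a 8) ++ [Char.ofNat ((PySem.Int.mod a 8).toNat + 48)]
  else []
termination_by a.toNat
decreasing_by exact ftOctShrink a h

-- int(s) for a nonempty all-'0'..'7' digit string (exact there: no sign/space/underscore cases arise)
def ftOctParse (cs : List Char) : Int :=
  cs.foldl (fun acc c => acc * 10 + ((c.toNat : Int) - 48)) 0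

def ft_oct_num_alt (a : Int) : Int :=
  if 0 < a then ftOctParse (ftOctChars a) else 0

-- ===== PRECONDITION & SPEC =====
def Spec_ft_oct_num (a : Int) (out : Int) : Prop := out = ft_oct_num_alt a
instance (a : Int) (out : Int) : Decidable (Spec_ft_oct_num a out) := by unfold Spec_ft_oct_num; infer_instance

-- ===== CLAIM (what is proved, stated in full; the proofs are below) =====
def Claim_equal_ft_oct_num : Prop := ∀ (a : Int), Dom_ft_oct_num a → Spec_ft_oct_num a (ft_oct_num a)

-- ===== LEMMAS AND PROOFS =====

-- the common value: decimal number whose digits are a's octal digits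
def ftOctVal (a : Int) : Int :=
  if h : 0 < a then
    PySem.Int.mod a 8 + 10 * ftOctVal (PySem.Int.floordiv a 8)
  else 0
termination_by a.toNat
decreasing_by exact ftOctShrink a h

theorem ftOctLoop_eq_val (n : Nat) :
    ∀ a k m : Int, a.toNat ≤ n → ftOctLoop a k m = k + m * ftOctVal a := by
  induction n with
  | zero =>
    intro a k m h
    have ha : ¬ 0 < a := by omega
    rw [ftOctLoop, ftOctVal]
    simp [ha]
  | succ n ih =>
    intro a k m h
    by_cases ha : 0 < a
    · rw [ftOctLoop, ftOctVal]
      simp only [ha, dif_pos]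
      rw [ih _ _ _ (by have := ftOctShrink a ha; omega)]
      ring
    · rw [ftOctLoop, ftOctVal]
      simp [ha]

theorem ftOct_digit_char (t : Nat) (ht : t < 8) :
    ((Char.ofNat (t + 48)).toNat : Int) - 48 = (t : Int) := by
  interval_cases t <;> decide

theorem ftOctParse_eq_val (n : Nat) :
    ∀ a : Int, a.toNat ≤ n → ftOctParse (ftOctChars a) = ftOctVal a := by
  induction n with
  | zero =>
    intro a h
    have ha : ¬ 0 < a := by omega
    rw [ftOctChars, ftOctVal]
    simp [ha, ftOctParse]
  | succ n ih =>
    intro a h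
    by_cases ha : 0 < a
    · have hmod : 0 ≤ PySem.Int.mod a 8 ∧ PySem.Int.mod a 8 < 8 := by
        rw [PySem.Int.mod_eq_emod_of_pos (by norm_num)]
        constructor
        · exact Int.emod_nonneg a (by norm_num)
        · exact Int.emod_lt_of_pos a (by norm_num)
      rw [ftOctChars, ftOctVal]
      simp only [ha, dif_pos]
      unfold ftOctParse
      rw [List.foldl_append]
      have hih := ih (PySem.Int.floordiv a 8) (by have := ftOctShrink a ha; omega)
      unfold ftOctParse at hih
      rw [hih]
      simp only [List.foldl]
      rw [ftOct_digit_char (PySem.Int.mod a 8).toNat (by omega)]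
      have : ((PySem.Int.mod a 8).toNat : Int) = PySem.Int.mod a 8 := by omega
      rw [this]
      ring
    · rw [ftOctChars, ftOctVal]
      simp [ha, ftOctParse]

-- ===== VERDICT (by name: the statement is the Claim_ definition above) =====
theorem ft_oct_num_spec : Claim_equal_ft_oct_num := by
  intro a _
  unfold Spec_ft_oct_num ft_oct_num ft_oct_num_alt
  rw [ftOctLoop_eq_val a.toNat a 0 1 le_rfl]
  by_cases ha : 0 < a
  · rw [ftOctParse_eq_val a.toNat a le_rfl]
    simp [ha]
  · rw [ftOctVal]
    simp [ha]
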